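-- pv_equiv track=rewrite | github.com/violet-zct/fairseq-detect-hallucination | util_scripts/predict_hallucination_mt.py | convert_spm_labels_to_raw_labels
-- ===== SOURCE A (Python) =====
-- def convert_spm_labels_to_raw_labels(sent_bpe, sent_detoks, bpe_labels):
--     cat_bpe = sent_bpe.split()
--     assert len(cat_bpe) == len(bpe_labels)
--     detok_labels = []
--     detoks = []
--     atom = []
--     labels = []
--     for token, label in zip(cat_bpe, bpe_labels):
--         if len(atom) == 0:
--             atom.append(token)
--             labels.append(label)
--         elif token.startswith('\u2581') and len(atom) > 0:
--             detok_labels.append(1 if sum(labels) > 0 else 0)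
--             recover = " ".join(atom).replace('\u2581', ' ').replace(' ', '')
--             detoks.append(recover)
--             atom = []
--             atom.append(token)
--             labels = []
--             labels.append(label)
--         else:
--             atom.append(token)
--             labels.append(label)
--     if len(atom) > 0 and len(labels) > 0:
--         detok_labels.append(1 if sum(labels) > 0 else 0)
--         token = " ".join(atom).replace('\u2581', ' ').replace(' ', '')
--         detoks.append(token)
--
--     # we don't deal with overlong sentences
--     if len(sent_detoks) != len(detok_labels):
--         return [1] * len(sent_detoks), True
--     return detok_labels, False
-- ===== SOURCE B (Python) =====
-- def _merge(pairs):
--     # recursively peel off one detokenized word (head sub-token plus the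
--     # following non-'\u2581' sub-tokens) and emit its merged label
--     if not pairs:
--         return []
--     head_label = pairs[0][1]
--     rest = pairs[1:]
--     k = 0
--     while k < len(rest) and not rest[k][0].startswith('\u2581'):
--         k += 1
--     total = head_label + sum(lab for _, lab in rest[:k])
--     return [1 if total > 0 else 0] + _merge(rest[k:])
--
--
-- def convert_spm_labels_to_raw_labels(sent_bpe, sent_detoks, bpe_labels):
--     cat_bpe = sent_bpe.split()
--     assert len(cat_bpe) == len(bpe_labels)
--     detok_labels = _merge(list(zip(cat_bpe, bpe_labels)))
--     if len(sent_detoks) != len(detok_labels):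
--         return [1] * len(sent_detoks), True
--     return detok_labels, False
-- ===== Notes on version B (the rewrite author's own statement) =====
-- stated objective: simpler
-- what changed: B replaces A's single forward pass with a 4-list accumulator state (and the unused detoks string reconstruction) by a recursive helper that peels off one word group at a time (head sub-token plus following non-'▁' sub-tokens) and emits its merged label directly.
import Mathlib
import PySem

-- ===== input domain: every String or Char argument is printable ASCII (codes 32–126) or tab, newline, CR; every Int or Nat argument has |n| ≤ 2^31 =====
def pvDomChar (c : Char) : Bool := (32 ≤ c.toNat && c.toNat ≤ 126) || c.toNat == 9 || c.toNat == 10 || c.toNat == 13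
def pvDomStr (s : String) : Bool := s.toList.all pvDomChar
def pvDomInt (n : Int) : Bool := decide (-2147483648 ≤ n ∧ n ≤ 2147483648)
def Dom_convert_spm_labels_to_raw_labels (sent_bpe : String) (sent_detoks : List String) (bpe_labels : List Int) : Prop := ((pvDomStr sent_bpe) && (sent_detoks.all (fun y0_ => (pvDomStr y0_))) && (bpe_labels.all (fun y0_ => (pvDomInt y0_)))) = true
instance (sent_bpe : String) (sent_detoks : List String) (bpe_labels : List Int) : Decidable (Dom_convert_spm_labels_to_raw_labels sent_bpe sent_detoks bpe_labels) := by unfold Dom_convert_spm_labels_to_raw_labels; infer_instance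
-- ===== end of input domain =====

-- B replaces A's forward pass with 4-list accumulator state (and its unused detoks reconstruction)
-- by a recursive helper peeling off one word group at a time (objective: simpler).

-- Python's sum() over a list of ints
def pvSum (xs : List Int) : Int := xs.foldl (· + ·) 0

-- '1 if s > 0 else 0'
def pvFlag (s : Int) : Int := if s > 0 then 1 else 0

-- ===== PORT A =====
def pvStepA (s : List Int × List String × List String × List Int) (tl : String × Int) :
    List Int × List String × List String × List Int :=
  let detok_labels := s.1; let detoks := s.2.1; let atom := s.2.2.1; let labels := s.2.2.2
  let token := tl.1; let label := tl.2
  if atom.length = 0 then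
    (detok_labels, detoks, atom ++ [token], labels ++ [label])
  else if PySem.Str.startswith token "▁" && decide (0 < atom.length) then
    (detok_labels ++ [pvFlag (pvSum labels)],
     detoks ++ [PySem.Str.replace (PySem.Str.replace (PySem.Str.join " " atom) "▁" " ") " " ""],
     [token], [label])
  else
    (detok_labels, detoks, atom ++ [token], labels ++ [label])

def convert_spm_labels_to_raw_labels (sent_bpe : String) (sent_detoks : List String) (bpe_labels : List Int) : List Int × Bool :=
  let cat_bpe := PySem.Str.split₀ sent_bpe
  let st := (cat_bpe.zip bpe_labels).foldl pvStepA ([], [], [], [])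
  let detok_labels :=
    if 0 < st.2.2.1.length ∧ 0 < st.2.2.2.length
    then st.1 ++ [pvFlag (pvSum st.2.2.2)]
    else st.1
  if sent_detoks.length ≠ detok_labels.length then
    (List.replicate sent_detoks.length 1, true)
  else
    (detok_labels, false)

-- ===== PORT B =====
-- port of _merge: rest[:k] / rest[k:] with k the first '▁'-starting position are takeWhile/dropWhile
def pvMerge (pairs : List (String × Int)) : List Int :=
  match pairs with
  | [] => []
  | (_, head_label) :: rest =>
    let grp := rest.takeWhile (fun p => !PySem.Str.startswith p.1 "▁")
    let total := head_label + pvSum (grp.map (·.2))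
    pvFlag total :: pvMerge (rest.dropWhile (fun p => !PySem.Str.startswith p.1 "▁"))
termination_by pairs.length
decreasing_by
  exact Nat.lt_succ_of_le (List.length_dropWhile_le _ _)

def convert_spm_labels_to_raw_labels_alt (sent_bpe : String) (sent_detoks : List String) (bpe_labels : List Int) : List Int × Bool :=
  let cat_bpe := PySem.Str.split₀ sent_bpe
  let detok_labels := pvMerge (cat_bpe.zip bpe_labels)
  if sent_detoks.length ≠ detok_labels.length then
    (List.replicate sent_detoks.length 1, true)
  else
    (detok_labels, false)

-- ===== PRECONDITION & SPEC =====
-- Pre_: A's 'assert len(cat_bpe) == len(bpe_labels)' raises AssertionError otherwise.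
def Pre_convert_spm_labels_to_raw_labels (sent_bpe : String) (sent_detoks : List String) (bpe_labels : List Int) : Prop :=
  (PySem.Str.split₀ sent_bpe).length = bpe_labels.length
instance (sent_bpe : String) (sent_detoks : List String) (bpe_labels : List Int) : Decidable (Pre_convert_spm_labels_to_raw_labels sent_bpe sent_detoks bpe_labels) := by unfold Pre_convert_spm_labels_to_raw_labels; infer_instance

def pvWitness_convert_spm_labels_to_raw_labels : String × List String × List Int := ("ab c d", ["ab", "cd"], [0, 1, 0])

def Spec_convert_spm_labels_to_raw_labels (sent_bpe : String) (sent_detoks : List String) (bpe_labels : List Int) (out : List Int × Bool) : Prop := out = convert_spm_labels_to_raw_labels_alt sent_bpe sent_detoks bpe_labels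
instance (sent_bpe : String) (sent_detoks : List String) (bpe_labels : List Int) (out : List Int × Bool) : Decidable (Spec_convert_spm_labels_to_raw_labels sent_bpe sent_detoks bpe_labels out) := by unfold Spec_convert_spm_labels_to_raw_labels; infer_instance

-- ===== CLAIM (what is proved, stated in full; the proofs are below) =====
def Claim_equal_convert_spm_labels_to_raw_labels : Prop := ∀ (sent_bpe : String) (sent_detoks : List String) (bpe_labels : List Int), Dom_convert_spm_labels_to_raw_labels sent_bpe sent_detoks bpe_labels → Pre_convert_spm_labels_to_raw_labels sent_bpe sent_detoks bpe_labels → Spec_convert_spm_labels_to_raw_labels sent_bpe sent_detoks bpe_labels (convert_spm_labels_to_raw_labels sent_bpe sent_detoks bpe_labels)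

-- ===== LEMMAS AND PROOFS =====

lemma pvSum_shift (xs : List Int) (a : Int) : xs.foldl (· + ·) a = a + pvSum xs := by
  induction xs generalizing a with
  | nil => simp [pvSum]
  | cons x xs ih => simp only [List.foldl_cons, pvSum]; rw [ih, ih (0 + x)]; ring

lemma pvSum_cons (x : Int) (xs : List Int) : pvSum (x :: xs) = x + pvSum xs := by
  simp only [pvSum, List.foldl_cons, zero_add]; exact pvSum_shift xs x

lemma pvSum_append_singleton (xs : List Int) (x : Int) : pvSum (xs ++ [x]) = pvSum xs + x := by
  simp [pvSum, List.foldl_append]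

lemma pvMerge_cons (t : String) (l : Int) (rest : List (String × Int)) :
    pvMerge ((t, l) :: rest)
      = pvFlag (l + pvSum ((rest.takeWhile (fun p => !PySem.Str.startswith p.1 "▁")).map (·.2)))
          :: pvMerge (rest.dropWhile (fun p => !PySem.Str.startswith p.1 "▁")) := by
  rw [pvMerge.eq_def]

-- the final-flush value A computes from a loop state
def pvFinish (st : List Int × List String × List String × List Int) : List Int :=
  if 0 < st.2.2.1.length ∧ 0 < st.2.2.2.length
  then st.1 ++ [pvFlag (pvSum st.2.2.2)]
  else st.1

lemma pvFinish_def (st : List Int × List String × List String × List Int) :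
    (if 0 < st.2.2.1.length ∧ 0 < st.2.2.2.length then st.1 ++ [pvFlag (pvSum st.2.2.2)] else st.1)
      = pvFinish st := rfl

-- loop invariant: from a state with a nonempty open group, A's remaining loop plus final
-- flush emits the merged label of the current group extended by the leading non-'▁' pairs,
-- followed by pvMerge of the remainder.
lemma pvLoopA (ps : List (String × Int)) (out : List Int) (detoks atom : List String)
    (labels : List Int) (ha : 0 < atom.length) (hl : 0 < labels.length) :
    pvFinish (ps.foldl pvStepA (out, detoks, atom, labels))
      = out ++ pvFlag (pvSum labels +
            pvSum ((ps.takeWhile (fun p => !PySem.Str.startswith p.1 "▁")).map (·.2)))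
          :: pvMerge (ps.dropWhile (fun p => !PySem.Str.startswith p.1 "▁")) := by
  induction ps generalizing out detoks atom labels with
  | nil =>
    have ha' : atom ≠ [] := by intro h; simp [h] at ha
    have hl' : labels ≠ [] := by intro h; simp [h] at hl
    simp [pvFinish, ha', hl', pvMerge, pvSum]
  | cons p ps ih =>
    obtain ⟨t, l⟩ := p
    by_cases hsw : PySem.Str.startswith t "▁" = true
    · -- '▁' token: flush the open group, restart with [t],[l]
      have hsw' : PySem.Chars.startswith t.toList ['▁'] = true := by simpa using hsw
      rw [List.foldl_cons]
      have hstep : pvStepA (out, detoks, atom, labels) (t, l)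
          = (out ++ [pvFlag (pvSum labels)],
             detoks ++ [PySem.Str.replace (PySem.Str.replace (PySem.Str.join " " atom) "▁" " ") " " ""],
             [t], [l]) := by
        simp [pvStepA, Nat.pos_iff_ne_zero.mp ha, ha, hsw']
      rw [hstep, ih _ _ _ _ (by simp) (by simp)]
      have h1 : (((t, l) :: ps).takeWhile (fun p => !PySem.Str.startswith p.1 "▁")) = [] := by
        simp [hsw']
      have h2 : (((t, l) :: ps).dropWhile (fun p => !PySem.Str.startswith p.1 "▁")) = (t, l) :: ps := by
        simp [hsw']
      rw [h1, h2, pvMerge_cons]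
      simp [pvSum, List.append_assoc]
    · -- continuation token: extend the open group
      have hsw' : PySem.Chars.startswith t.toList ['▁'] = false := by
        simpa using hsw
      rw [List.foldl_cons]
      have hstep : pvStepA (out, detoks, atom, labels) (t, l)
          = (out, detoks, atom ++ [t], labels ++ [l]) := by
        by_cases haz : atom.length = 0
        · simp [pvStepA, haz]
        · simp [pvStepA, haz, hsw']
      rw [hstep, ih _ _ _ _ (by simp) (by simp)]
      have harg : pvSum (labels ++ [l]) +
            pvSum ((ps.takeWhile (fun p => !PySem.Str.startswith p.1 "▁")).map (·.2))
          = pvSum labels +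
            pvSum (((((t, l) :: ps)).takeWhile (fun p => !PySem.Str.startswith p.1 "▁")).map (·.2)) := by
        simp [hsw', pvSum_append_singleton, pvSum_cons]
        ring
      rw [harg]
      simp [hsw']

-- A's detok_labels equals pvMerge of the zipped list, for any zipped list
lemma pvA_eq_merge (ps : List (String × Int)) :
    pvFinish (ps.foldl pvStepA ([], [], [], [])) = pvMerge ps := by
  cases ps with
  | nil => simp [pvFinish, pvMerge]
  | cons p ps =>
    obtain ⟨t, l⟩ := p
    rw [List.foldl_cons]
    have hstep : pvStepA (([], [], [], []) : List Int × List String × List String × List Int) (t, l)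
        = ([], [], [t], [l]) := by
      simp [pvStepA]
    rw [hstep, pvLoopA _ _ _ _ _ (by simp) (by simp), pvMerge_cons]
    simp [pvSum]

-- ===== VERDICT (by name: the statement is the Claim_ definition above) =====
theorem convert_spm_labels_to_raw_labels_spec : Claim_equal_convert_spm_labels_to_raw_labels := by
  intro sent_bpe sent_detoks bpe_labels _ _
  show _ = _
  simp only [convert_spm_labels_to_raw_labels, convert_spm_labels_to_raw_labels_alt]
  rw [pvFinish_def, pvA_eq_merge]
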